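-- pv_equiv track=rewrite | github.com/bokesyo/CART-de-novo | test at any time.py | count
-- ===== SOURCE A (Python) =====
-- def count(data):
--     table={'High Quality':0,'Low Quality':0}
--     for line in data:
--         if line[-1]>6:
--             table['High Quality']+=1
--         else:
--             table['Low Quality']+=1
--     return table
-- ===== SOURCE B (Python) =====
-- def count(data):
--     # divide-and-conquer: split the rows in half, count each half recursively,
--     # and combine the (high, low) pairs
--     def go(rows):
--         n = len(rows)
--         if n == 0:
--             return (0, 0)
--         if n == 1:
--             return (1, 0) if rows[0][-1] > 6 else (0, 1)
--         mid = n // 2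
--         h1, l1 = go(rows[:mid])
--         h2, l2 = go(rows[mid:])
--         return (h1 + h2, l1 + l2)
--     h, l = go(list(data))
--     return {'High Quality': h, 'Low Quality': l}
-- ===== Notes on version B (the rewrite author's own statement) =====
-- stated objective: alternative
-- what changed: B replaces A's linear loop over two dict counters with a divide-and-conquer recursion that splits the row list at the midpoint, counts each half recursively at the singleton base case, and combines the (high, low) pairs; correct because the counts are additive over list concatenation.
import Mathlib
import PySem

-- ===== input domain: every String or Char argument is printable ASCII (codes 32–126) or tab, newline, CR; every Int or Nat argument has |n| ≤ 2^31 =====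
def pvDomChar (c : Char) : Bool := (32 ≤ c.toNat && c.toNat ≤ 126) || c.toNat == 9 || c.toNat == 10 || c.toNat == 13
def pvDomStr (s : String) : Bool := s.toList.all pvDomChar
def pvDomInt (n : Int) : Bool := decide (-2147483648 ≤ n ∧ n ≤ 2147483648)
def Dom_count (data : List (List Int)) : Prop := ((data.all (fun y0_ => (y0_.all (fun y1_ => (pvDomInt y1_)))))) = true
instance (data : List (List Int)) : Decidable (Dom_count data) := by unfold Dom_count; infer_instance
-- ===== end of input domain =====

-- B counts by divide-and-conquer on halves instead of A's linear two-counter loop (objective: alternative).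

-- ===== PORT A =====
-- A: loop over rows, incrementing one of two dict counters per row.
def count (data : List (List Int)) : List (String × Int) :=
  (data.foldl (fun table line =>
      if (PySem.List.pyGet? line (-1)).getD 0 > 6 then
        table.modify "High Quality" 0 (· + 1)
      else
        table.modify "Low Quality" 0 (· + 1))
    (PySem.Dict.ofList [("High Quality", (0 : Int)), ("Low Quality", (0 : Int))])).items

-- ===== PORT B =====
-- B's recursive helper go: split at the midpoint, combine (high, low) pairs.
-- rows[:mid] / rows[mid:] with 0 ≤ mid ≤ len are exactly List.take / List.drop.
-- The Nat fuel (= rows.length at the top call) only makes the same recursion structural.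
def goBAux : Nat → List (List Int) → Int × Int
  | 0, _ => (0, 0)
  | fuel + 1, rows =>
    if rows.length = 0 then (0, 0)
    else if rows.length = 1 then
      if (PySem.List.pyGet? ((PySem.List.pyGet? rows 0).getD []) (-1)).getD 0 > 6
      then (1, 0) else (0, 1)
    else
      let mid := rows.length / 2
      let p1 := goBAux fuel (rows.take mid)
      let p2 := goBAux fuel (rows.drop mid)
      (p1.1 + p2.1, p1.2 + p2.2)

def goB (rows : List (List Int)) : Int × Int := goBAux rows.length rows

def count_alt (data : List (List Int)) : List (String × Int) :=
  let p := goB data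
  [("High Quality", p.1), ("Low Quality", p.2)]

-- ===== PRECONDITION & SPEC =====
-- Pre_ excludes rows that are empty lists: there line[-1] raises IndexError in both A and B.
def Pre_count (data : List (List Int)) : Prop := ∀ line ∈ data, line ≠ []
instance (data : List (List Int)) : Decidable (Pre_count data) := by unfold Pre_count; infer_instance
def pvWitness_count : List (List Int) := [[1, 2], [3, 9], [0]]
def Spec_count (data : List (List Int)) (out : List (String × Int)) : Prop := out = count_alt data
instance (data : List (List Int)) (out : List (String × Int)) : Decidable (Spec_count data out) := by unfold Spec_count; infer_instance

-- ===== CLAIM (what is proved, stated in full; the proofs are below) =====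
def Claim_equal_count : Prop := ∀ (data : List (List Int)), Dom_count data → Pre_count data → Spec_count data (count data)

-- ===== LEMMAS AND PROOFS =====

def pvHigh (data : List (List Int)) : Int :=
  data.foldl (fun acc line =>
      if (PySem.List.pyGet? line (-1)).getD 0 > 6 then acc + 1 else acc) 0

def pvLow (data : List (List Int)) : Int :=
  data.foldl (fun acc line =>
      if (PySem.List.pyGet? line (-1)).getD 0 > 6 then acc else acc + 1) 0

lemma pvHigh_acc (data : List (List Int)) (a : Int) :
    data.foldl (fun acc line =>
      if (PySem.List.pyGet? line (-1)).getD 0 > 6 then acc + 1 else acc) a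
      = a + pvHigh data := by
  induction data generalizing a with
  | nil => simp [pvHigh]
  | cons x xs ih =>
      simp only [pvHigh, List.foldl_cons]
      rw [ih, ih]
      split <;> omega

lemma pvLow_acc (data : List (List Int)) (a : Int) :
    data.foldl (fun acc line =>
      if (PySem.List.pyGet? line (-1)).getD 0 > 6 then acc else acc + 1) a
      = a + pvLow data := by
  induction data generalizing a with
  | nil => simp [pvLow]
  | cons x xs ih =>
      simp only [pvLow, List.foldl_cons]
      rw [ih, ih]
      split <;> omega

lemma pvHigh_append (a b : List (List Int)) : pvHigh (a ++ b) = pvHigh a + pvHigh b := by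
  simp only [pvHigh, List.foldl_append]
  rw [pvHigh_acc]
  rfl

lemma pvLow_append (a b : List (List Int)) : pvLow (a ++ b) = pvLow a + pvLow b := by
  simp only [pvLow, List.foldl_append]
  rw [pvLow_acc]
  rfl

lemma pvHigh_cons (x : List Int) (xs : List (List Int)) :
    pvHigh (x :: xs)
      = (if (PySem.List.pyGet? x (-1)).getD 0 > 6 then 1 else 0) + pvHigh xs := by
  conv_lhs => unfold pvHigh
  rw [List.foldl_cons, pvHigh_acc]
  split <;> omega

lemma goB_eq_aux (n : Nat) : ∀ rows : List (List Int), rows.length ≤ n →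
    goBAux n rows = (pvHigh rows, pvLow rows) := by
  induction n with
  | zero =>
      intro rows h
      rw [List.length_eq_zero_iff.mp (Nat.le_zero.mp h)]
      simp [goBAux, pvHigh, pvLow]
  | succ n ih =>
      intro rows h
      rw [goBAux]
      by_cases h0 : rows.length = 0
      · rw [if_pos h0]
        rw [List.length_eq_zero_iff] at h0
        subst h0
        simp [pvHigh, pvLow]
      · rw [if_neg h0]
        by_cases h1 : rows.length = 1
        · rw [if_pos h1]
          obtain ⟨x, rfl⟩ := List.length_eq_one_iff.mp h1
          have hx : (PySem.List.pyGet? [x] 0).getD [] = x := by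
            simp [PySem.List.pyGet?, PySem.List.pyIdx?]
          rw [hx]
          simp only [pvHigh, pvLow, List.foldl_cons, List.foldl_nil]
          split <;> simp
        · rw [if_neg h1]
          change ((goBAux n (List.take (rows.length / 2) rows)).1
                    + (goBAux n (List.drop (rows.length / 2) rows)).1,
                  (goBAux n (List.take (rows.length / 2) rows)).2
                    + (goBAux n (List.drop (rows.length / 2) rows)).2) = _
          rw [ih _ (by simp only [List.length_take]; omega),
              ih _ (by simp only [List.length_drop]; omega)]
          conv_rhs => rw [← List.take_append_drop (rows.length / 2) rows]
          rw [pvHigh_append, pvLow_append]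

lemma goB_eq (rows : List (List Int)) : goB rows = (pvHigh rows, pvLow rows) :=
  goB_eq_aux rows.length rows le_rfl

lemma count_loop (data : List (List Int)) (h l : Int) :
    data.foldl (fun table line =>
      if (PySem.List.pyGet? line (-1)).getD 0 > 6 then
        table.modify "High Quality" 0 (· + 1)
      else
        table.modify "Low Quality" 0 (· + 1))
      (PySem.Dict.mk [("High Quality", h), ("Low Quality", l)])
    = PySem.Dict.mk [("High Quality", h + pvHigh data),
                     ("Low Quality", l + ((data.length : Int) - pvHigh data))] := by
  induction data generalizing h l with
  | nil => simp [pvHigh]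
  | cons x xs ih =>
      simp only [List.foldl_cons]
      by_cases hx : (PySem.List.pyGet? x (-1)).getD 0 > 6
      · rw [if_pos hx]
        have hm : (PySem.Dict.mk [("High Quality", h), ("Low Quality", l)]).modify
            "High Quality" 0 (· + 1)
            = PySem.Dict.mk [("High Quality", h + 1), ("Low Quality", l)] := by
          simp [PySem.Dict.modify, PySem.Dict.contains, PySem.Dict.getD,
            PySem.Dict.get?, PySem.Dict.insert]
        rw [hm, ih, pvHigh_cons, if_pos hx]
        simp only [List.length_cons, PySem.Dict.mk.injEq, List.cons.injEq, Prod.mk.injEq]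
        push_cast
        and_intros <;> first | trivial | omega
      · rw [if_neg hx]
        have hm : (PySem.Dict.mk [("High Quality", h), ("Low Quality", l)]).modify
            "Low Quality" 0 (· + 1)
            = PySem.Dict.mk [("High Quality", h), ("Low Quality", l + 1)] := by
          simp [PySem.Dict.modify, PySem.Dict.contains, PySem.Dict.getD,
            PySem.Dict.get?, PySem.Dict.insert]
        rw [hm, ih, pvHigh_cons, if_neg hx]
        simp only [List.length_cons, PySem.Dict.mk.injEq, List.cons.injEq, Prod.mk.injEq]
        push_cast
        and_intros <;> first | trivial | omega

lemma pvHigh_add_pvLow (data : List (List Int)) :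
    pvHigh data + pvLow data = (data.length : Int) := by
  induction data with
  | nil => simp [pvHigh, pvLow]
  | cons x xs ih =>
      simp only [pvHigh, pvLow, List.foldl_cons] at *
      rw [pvHigh_acc, pvLow_acc]
      rw [pvHigh_acc, pvLow_acc] at ih
      simp only [List.length_cons]
      split <;> push_cast <;> omega

-- ===== VERDICT (by name: the statement is the Claim_ definition above) =====
theorem count_spec : Claim_equal_count := by
  intro data _ _
  unfold Spec_count count count_alt
  rw [show PySem.Dict.ofList [("High Quality", (0 : Int)), ("Low Quality", (0 : Int))]
      = PySem.Dict.mk [("High Quality", (0 : Int)), ("Low Quality", (0 : Int))] from by decide]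
  rw [count_loop, goB_eq]
  have hs := pvHigh_add_pvLow data
  have h2 : (data.length : Int) - pvHigh data = pvLow data := by omega
  simp [h2]
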